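-- pv_equiv track=rewrite | github.com/Iansabia/DS340-Project | src/experiments/retraining_policy.py | should_run_scaling_experiment
-- ===== SOURCE A (Python) =====
-- SCALING_CHECKPOINTS: tuple[int, ...] = (50, 100, 250, 500, 1000, 2000)
--
-- def should_run_scaling_experiment(
--     current_bars_per_pair: int,
--     last_checkpoint_ran: int,
--     checkpoints: tuple[int, ...] = SCALING_CHECKPOINTS,
-- ) -> bool:
--     """Return True if we've crossed a new scaling checkpoint.
--
--     The scaling experiment is expensive (trains 4+ models), so we only
--     run it when ``current_bars_per_pair`` crosses the next boundary above
--     ``last_checkpoint_ran``.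
--
--     Example:
--         last run at 50 → we run again the moment we hit 100
--         last run at 100 → we run again the moment we hit 250
--         last run at 100, currently at 130 → skip (not yet at 250)
--     """
--     # Find the largest checkpoint we've crossed
--     eligible = [c for c in checkpoints if c <= current_bars_per_pair]
--     if not eligible:
--         return False
--     highest_crossed = max(eligible)
--     return highest_crossed > last_checkpoint_ran
-- ===== SOURCE B (Python) =====
-- SCALING_CHECKPOINTS: tuple[int, ...] = (50, 100, 250, 500, 1000, 2000)
--
-- def should_run_scaling_experiment(
--     current_bars_per_pair: int,
--     last_checkpoint_ran: int,
--     checkpoints: tuple[int, ...] = SCALING_CHECKPOINTS,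
-- ) -> bool:
--     """True iff some checkpoint lies in (last_checkpoint_ran, current_bars_per_pair]."""
--     return any(last_checkpoint_ran < c <= current_bars_per_pair for c in checkpoints)
-- ===== Notes on version B (the rewrite author's own statement) =====
-- stated objective: simpler
-- what changed: Replaces the filter-list / emptiness-guard / max-then-compare pipeline with a single short-circuiting existential scan testing last < c <= current for each checkpoint.
import Mathlib
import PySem

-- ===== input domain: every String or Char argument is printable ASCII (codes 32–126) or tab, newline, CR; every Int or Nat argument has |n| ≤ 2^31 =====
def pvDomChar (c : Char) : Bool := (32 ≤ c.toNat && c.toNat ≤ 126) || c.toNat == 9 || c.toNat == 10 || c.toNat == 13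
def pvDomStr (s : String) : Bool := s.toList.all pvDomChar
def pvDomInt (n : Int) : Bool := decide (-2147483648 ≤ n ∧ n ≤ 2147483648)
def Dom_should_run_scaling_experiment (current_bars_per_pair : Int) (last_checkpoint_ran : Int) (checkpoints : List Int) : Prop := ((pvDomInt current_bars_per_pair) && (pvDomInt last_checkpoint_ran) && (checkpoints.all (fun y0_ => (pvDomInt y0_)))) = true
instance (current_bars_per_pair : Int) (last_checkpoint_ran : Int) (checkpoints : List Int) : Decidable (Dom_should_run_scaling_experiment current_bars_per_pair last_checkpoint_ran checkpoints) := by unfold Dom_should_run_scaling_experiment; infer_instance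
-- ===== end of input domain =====

-- B replaces A's filter-list / emptiness-guard / max-then-compare pipeline with a single
-- short-circuiting existential scan (any checkpoint in (last, current]); simpler, same cost.

-- ===== PORT A =====
def should_run_scaling_experiment (current_bars_per_pair : Int) (last_checkpoint_ran : Int) (checkpoints : List Int) : Bool :=
  let eligible := checkpoints.filter (fun c => decide (c ≤ current_bars_per_pair))
  if eligible = [] then false
  else
    match PySem.List.max? eligible (fun x => x) with
    | some highest_crossed => decide (highest_crossed > last_checkpoint_ran)
    | none => false

-- ===== PORT B =====
-- B: one short-circuiting existential scan — any(last < c <= current for c in checkpoints)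
def should_run_scaling_experiment_alt (current_bars_per_pair : Int) (last_checkpoint_ran : Int) (checkpoints : List Int) : Bool :=
  checkpoints.any (fun c => decide (last_checkpoint_ran < c) && decide (c ≤ current_bars_per_pair))

-- ===== PRECONDITION & SPEC =====
def Spec_should_run_scaling_experiment (current_bars_per_pair : Int) (last_checkpoint_ran : Int) (checkpoints : List Int) (out : Bool) : Prop := out = should_run_scaling_experiment_alt current_bars_per_pair last_checkpoint_ran checkpoints
instance (current_bars_per_pair : Int) (last_checkpoint_ran : Int) (checkpoints : List Int) (out : Bool) : Decidable (Spec_should_run_scaling_experiment current_bars_per_pair last_checkpoint_ran checkpoints out) := by unfold Spec_should_run_scaling_experiment; infer_instance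

-- ===== CLAIM (what is proved, stated in full; the proofs are below) =====
def Claim_equal_should_run_scaling_experiment : Prop := ∀ (current_bars_per_pair : Int) (last_checkpoint_ran : Int) (checkpoints : List Int), Dom_should_run_scaling_experiment current_bars_per_pair last_checkpoint_ran checkpoints → Spec_should_run_scaling_experiment current_bars_per_pair last_checkpoint_ran checkpoints (should_run_scaling_experiment current_bars_per_pair last_checkpoint_ran checkpoints)

-- ===== LEMMAS AND PROOFS =====

-- ===== VERDICT (by name: the statement is the Claim_ definition above) =====
theorem should_run_scaling_experiment_spec : Claim_equal_should_run_scaling_experiment := by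
  intro cur last cps _
  unfold Spec_should_run_scaling_experiment should_run_scaling_experiment should_run_scaling_experiment_alt
  by_cases h : cps.filter (fun c => decide (c ≤ cur)) = []
  · simp only [if_pos h]
    symm
    simp only [List.any_eq_false]
    intro c hc
    have : c ∉ cps.filter (fun c => decide (c ≤ cur)) := by simp [h]
    simp only [List.mem_filter, hc, true_and, decide_eq_true_eq] at this
    simp [this]
  · simp only [if_neg h]
    obtain ⟨m, hm⟩ : ∃ m, PySem.List.max? (cps.filter (fun c => decide (c ≤ cur))) (fun x => x) = some m := by
      rcases e : PySem.List.max? (cps.filter (fun c => decide (c ≤ cur))) (fun x => x) with _ | m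
      · exact absurd ((PySem.List.max?_eq_none_iff _ _).mp e) h
      · exact ⟨m, rfl⟩
    have hmem := PySem.List.max?_mem hm
    have hmax := PySem.List.max?_isMax hm
    simp only [List.mem_filter, decide_eq_true_eq] at hmem
    rw [hm]
    by_cases hl : last < m
    · have : cps.any (fun c => decide (last < c) && decide (c ≤ cur)) = true := by
        simp only [List.any_eq_true]
        exact ⟨m, hmem.1, by simp [hl, hmem.2]⟩
      simp [this, hl]
    · have : cps.any (fun c => decide (last < c) && decide (c ≤ cur)) = false := by
        simp only [List.any_eq_false]
        intro c hc
        by_cases hcc : c ≤ cur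
        · have : c ≤ m := hmax c (by simp [List.mem_filter, hc, hcc])
          have : ¬ last < c := fun h' => hl (lt_of_lt_of_le h' this)
          simp [this]
        · simp [hcc]
      simp [this]
      omega
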